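-- pv_equiv track=rewrite | github.com/kdhdjdk090/claw-agent | claw_agent/cli.py | pick_model
-- ===== SOURCE A (Python) =====
-- def pick_model(models: list[str]) -> str:
--     preferred = [
--         "deepseek-v3.1:671b-cloud", "deepseek-v3.1",
--         "deepseek-r1:671b", "deepseek-r1:32b", "deepseek-r1:14b", "deepseek-r1:8b",
--         "deepseek-v3:671b", "deepseek-v3",
--         "deepseek-coder:6.7b", "deepseek-coder",
--         "gemma4:latest", "gemma4",
--         "qwen2.5:14b", "qwen2.5:7b",
--         "mistral:latest", "mistral",
--         "llama3:latest", "llama3.1:8b", "llama3",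
--     ]
--     for p in preferred:
--         if any(p in m for m in models):
--             return next(m for m in models if p in m)
--     return models[0] if models else "deepseek-v3.1:671b-cloud"
-- ===== SOURCE B (Python) =====
-- def pick_model(models: list[str]) -> str:
--     preferred = [
--         "deepseek-v3.1:671b-cloud", "deepseek-v3.1",
--         "deepseek-r1:671b", "deepseek-r1:32b", "deepseek-r1:14b", "deepseek-r1:8b",
--         "deepseek-v3:671b", "deepseek-v3",
--         "deepseek-coder:6.7b", "deepseek-coder",
--         "gemma4:latest", "gemma4",
--         "qwen2.5:14b", "qwen2.5:7b",
--         "mistral:latest", "mistral",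
--         "llama3:latest", "llama3.1:8b", "llama3",
--     ]
--     best = None
--     best_rank = len(preferred) + 1
--     for m in models:
--         rank = next((i for i, p in enumerate(preferred) if p in m), len(preferred))
--         if rank < best_rank:
--             best, best_rank = m, rank
--     return best if best is not None else "deepseek-v3.1:671b-cloud"
-- ===== Notes on version B (the rewrite author's own statement) =====
-- stated objective: alternative
-- what changed: Replaces A's preference-major outer scan (each preferred entry scanned against all models twice via any+next) by a single model-major pass that computes each model's best preference rank and keeps the argmin, breaking ties by first occurrence.
import Mathlib
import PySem

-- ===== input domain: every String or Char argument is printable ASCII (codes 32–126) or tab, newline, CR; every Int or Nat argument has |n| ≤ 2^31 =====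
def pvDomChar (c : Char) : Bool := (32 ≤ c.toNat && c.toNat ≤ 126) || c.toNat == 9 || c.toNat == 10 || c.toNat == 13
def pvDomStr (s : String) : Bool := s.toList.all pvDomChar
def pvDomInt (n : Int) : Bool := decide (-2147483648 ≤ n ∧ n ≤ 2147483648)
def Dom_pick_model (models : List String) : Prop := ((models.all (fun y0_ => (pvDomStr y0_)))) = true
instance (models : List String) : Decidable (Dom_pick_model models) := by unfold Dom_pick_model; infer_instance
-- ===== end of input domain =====

-- B replaces A's preference-major double scan (any + next per preferred entry) by one
-- model-major pass keeping the argmin rank; objective: alternative decomposition, same cost.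

-- ===== PORT A =====
-- the module-level 'preferred' literal (shared data for both ports)
def preferredList : List String :=
  ["deepseek-v3.1:671b-cloud", "deepseek-v3.1",
   "deepseek-r1:671b", "deepseek-r1:32b", "deepseek-r1:14b", "deepseek-r1:8b",
   "deepseek-v3:671b", "deepseek-v3",
   "deepseek-coder:6.7b", "deepseek-coder",
   "gemma4:latest", "gemma4",
   "qwen2.5:14b", "qwen2.5:7b",
   "mistral:latest", "mistral",
   "llama3:latest", "llama3.1:8b", "llama3"]

-- 'for p in preferred: if any(p in m for m in models): return next(m for m in models if p in m)'
-- then 'return models[0] if models else "deepseek-v3.1:671b-cloud"'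
def pickA : List String → List String → String
  | [], models =>
    match models with
    | m :: _ => m
    | [] => "deepseek-v3.1:671b-cloud"
  | p :: ps, models =>
    if models.any (fun m => PySem.Str.isIn p m) then
      -- next(m for m in models if p in m): guarded by the 'any', the .getD default is unreachable
      (models.find? (fun m => PySem.Str.isIn p m)).getD ""
    else
      pickA ps models

def pick_model (models : List String) : String := pickA preferredList models

-- ===== PORT B =====
-- rank = next((i for i, p in enumerate(preferred) if p in m), len(preferred))
def rankB (m : String) : Nat :=
  (preferredList.findIdx? (fun p => PySem.Str.isIn p m)).getD preferredList.length

-- single pass over models keeping (best, best_rank); update on strict improvement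
def pick_model_alt (models : List String) : String :=
  let best := models.foldl
    (fun (acc : Option String × Nat) m =>
      if rankB m < acc.2 then (some m, rankB m) else acc)
    (none, preferredList.length + 1)
  match best.1 with
  | some m => m
  | none => "deepseek-v3.1:671b-cloud"

-- ===== PRECONDITION & SPEC =====
def Spec_pick_model (models : List String) (out : String) : Prop := out = pick_model_alt models
instance (models : List String) (out : String) : Decidable (Spec_pick_model models out) := by unfold Spec_pick_model; infer_instance

-- ===== CLAIM (what is proved, stated in full; the proofs are below) =====
def Claim_equal_pick_model : Prop := ∀ (models : List String), Dom_pick_model models → Spec_pick_model models (pick_model models)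

-- ===== LEMMAS AND PROOFS =====

-- rank of a model w.r.t. an arbitrary preference suffix
def rankOf (ps : List String) (m : String) : Nat :=
  (ps.findIdx? (fun p => PySem.Str.isIn p m)).getD ps.length

-- minimum of f over a list (none on [])
def minR (f : String → Nat) : List String → Option Nat
  | [] => none
  | m :: tl => some (match minR f tl with | none => f m | some v => min (f m) v)

theorem rankOf_nil (m : String) : rankOf [] m = 0 := rfl

theorem rankB_eq (m : String) : rankB m = rankOf preferredList m := rfl

theorem rankOf_cons (p : String) (ps : List String) (m : String) :
    rankOf (p :: ps) m = if PySem.Str.isIn p m then 0 else rankOf ps m + 1 := by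
  unfold rankOf
  rw [List.findIdx?_cons]
  by_cases h : PySem.Str.isIn p m = true
  · rw [if_pos h, if_pos h]; rfl
  · rw [if_neg h, if_neg h]
    cases ps.findIdx? (fun p => PySem.Str.isIn p m) <;> simp

theorem rankOf_le (ps : List String) (m : String) : rankOf ps m ≤ ps.length := by
  unfold rankOf
  cases h : ps.findIdx? (fun p => PySem.Str.isIn p m) with
  | none => simp
  | some i =>
    have := (List.findIdx?_eq_some_iff_findIdx_eq.mp h).1
    simp [Option.getD]; omega

theorem minR_congr (f g : String → Nat) (ms : List String)
    (h : ∀ m ∈ ms, f m = g m) : minR f ms = minR g ms := by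
  induction ms with
  | nil => rfl
  | cons m tl ih =>
    have hm : f m = g m := h m (by simp)
    have htl := ih (fun x hx => h x (by simp [hx]))
    simp [minR, hm, htl]

theorem minR_succ (f : String → Nat) (ms : List String) :
    minR (fun m => f m + 1) ms = (minR f ms).map (· + 1) := by
  induction ms with
  | nil => rfl
  | cons m tl ih =>
    simp only [minR, ih]
    cases htl : minR f tl with
    | none => rfl
    | some v =>
      simp only [Option.map_some, Option.some.injEq]
      omega

theorem minR_attained (f : String → Nat) (ms : List String) (μ : Nat)
    (h : minR f ms = some μ) : ∃ m, ms.find? (fun m => f m == μ) = some m ∧ f m = μ := by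
  induction ms generalizing μ with
  | nil => simp [minR] at h
  | cons m tl ih =>
    simp only [minR] at h
    cases htl : minR f tl with
    | none =>
      rw [htl] at h
      simp only [Option.some.injEq] at h
      exact ⟨m, by simp [h], h⟩
    | some v =>
      rw [htl] at h
      simp only [Option.some.injEq] at h
      by_cases hm : f m = μ
      · exact ⟨m, by simp [hm], hm⟩
      · have hμ : μ = v := by omega
        obtain ⟨w, hw, hfw⟩ := ih v htl
        subst hμ
        refine ⟨w, ?_, hfw⟩
        rw [List.find?_cons]
        have hne : (f m == μ) = false := by simp [hm]
        rw [hne]; exact hw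

theorem minR_zero_of_exists (f : String → Nat) (ms : List String)
    (h : ∃ m ∈ ms, f m = 0) : minR f ms = some 0 := by
  induction ms with
  | nil => simp at h
  | cons m tl ih =>
    simp only [minR]
    rcases h with ⟨x, hx, hfx⟩
    rcases List.mem_cons.mp hx with rfl | hx'
    · cases htl : minR f tl with
      | none => simp [hfx]
      | some v => simp only [Option.some.injEq]; omega
    · rw [ih ⟨x, hx', hfx⟩]
      simp only [Option.some.injEq]
      omega

theorem find?_congr_mem (p q : String → Bool) (ms : List String)
    (h : ∀ m ∈ ms, p m = q m) : ms.find? p = ms.find? q := by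
  induction ms with
  | nil => rfl
  | cons m tl ih =>
    rw [List.find?_cons, List.find?_cons, h m (by simp)]
    cases q m
    · exact ih (fun x hx => h x (by simp [hx]))
    · rfl

-- characterization of B's left fold: final best = first model attaining the minimum rank
theorem fold_char (f : String → Nat) (ms : List String) (s : Option String) (br : Nat) :
    ms.foldl (fun (acc : Option String × Nat) m =>
        if f m < acc.2 then (some m, f m) else acc) (s, br) =
      match minR f ms with
      | none => (s, br)
      | some μ => if μ < br then (ms.find? (fun m => f m == μ), μ) else (s, br) := by
  induction ms generalizing s br with
  | nil => rfl
  | cons m tl ih =>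
    rw [List.foldl_cons]
    by_cases hm : f m < br
    · simp only [hm, if_pos]
      rw [ih]
      simp only [minR]
      cases htl : minR f tl with
      | none =>
        simp [hm]
      | some v =>
        by_cases hv : v < f m
        · have hmin : min (f m) v = v := by omega
          have hne : (f m == v) = false := by simp; omega
          simp [hmin, hv, hne, show v < br by omega]
        · have hmin : min (f m) v = f m := by omega
          simp [hmin, hv, hm]
    · simp only [hm, if_false]
      rw [ih]
      simp only [minR]
      cases htl : minR f tl with
      | none => simp [show ¬ f m < br from hm]
      | some v =>
        by_cases hv : v < br
        · have hvm : v < f m := by omega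
          have hmin : min (f m) v = v := by omega
          have hne : (f m == v) = false := by simp; omega
          simp [hmin, hv, hne]
        · have : ¬ min (f m) v < br := by omega
          simp [hv, this]

-- characterization of A's preference-major scan as an argmin over ranks
theorem pickA_char (ps ms : List String) :
    pickA ps ms =
      match minR (rankOf ps) ms with
      | none => "deepseek-v3.1:671b-cloud"
      | some μ => (ms.find? (fun m => rankOf ps m == μ)).getD "" := by
  induction ps with
  | nil =>
    cases ms with
    | nil => rfl
    | cons m tl =>
      have h0 : minR (rankOf []) (m :: tl) = some 0 :=
        minR_zero_of_exists _ _ ⟨m, by simp, rfl⟩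
      simp [pickA, h0, rankOf_nil]
  | cons p ps' ih =>
    by_cases hany : ms.any (fun m => PySem.Str.isIn p m)
    · simp only [pickA, hany, if_pos]
      obtain ⟨x, hx, hpx⟩ := List.any_eq_true.mp hany
      have h0 : minR (rankOf (p :: ps')) ms = some 0 := by
        apply minR_zero_of_exists
        exact ⟨x, hx, by rw [rankOf_cons, hpx]; rfl⟩
      rw [h0]
      show (List.find? (fun m => PySem.Str.isIn p m) ms).getD "" =
        (List.find? (fun m => rankOf (p :: ps') m == 0) ms).getD ""
      have hfind : ms.find? (fun m => rankOf (p :: ps') m == 0) =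
          ms.find? (fun m => PySem.Str.isIn p m) := by
        apply find?_congr_mem
        intro m _
        rw [rankOf_cons]
        by_cases h : PySem.Str.isIn p m = true
        · rw [if_pos h, h]; rfl
        · have h' : PySem.Str.isIn p m = false := by simpa using h
          rw [if_neg h, h']
          simp
      rw [hfind]
    · simp only [pickA, hany, Bool.false_eq_true, if_false]
      rw [ih]
      have hnot : ∀ m ∈ ms, ¬ (PySem.Str.isIn p m = true) := by
        intro m hm hc
        exact hany (List.any_eq_true.mpr ⟨m, hm, hc⟩)
      have hrk : ∀ m ∈ ms, rankOf (p :: ps') m = rankOf ps' m + 1 := by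
        intro m hm
        rw [rankOf_cons]
        exact if_neg (hnot m hm)
      have hmin : minR (rankOf (p :: ps')) ms = (minR (rankOf ps') ms).map (· + 1) := by
        rw [minR_congr _ (fun m => rankOf ps' m + 1) ms hrk, minR_succ]
      rw [hmin]
      cases hμ : minR (rankOf ps') ms with
      | none => rfl
      | some μ =>
        simp only [Option.map_some]
        have : ms.find? (fun m => rankOf (p :: ps') m == μ + 1) =
            ms.find? (fun m => rankOf ps' m == μ) := by
          apply find?_congr_mem
          intro m hm
          rw [hrk m hm]
          simp
        rw [this]

-- ===== VERDICT (by name: the statement is the Claim_ definition above) =====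
theorem pick_model_spec : Claim_equal_pick_model := by
  intro models _
  unfold Spec_pick_model pick_model pick_model_alt
  rw [pickA_char]
  rw [show (none, preferredList.length + 1) = ((none : Option String), preferredList.length + 1) from rfl]
  rw [fold_char rankB models none (preferredList.length + 1)]
  have hrk : minR rankB models = minR (rankOf preferredList) models :=
    minR_congr _ _ _ (fun m _ => rankB_eq m)
  cases hμ : minR (rankOf preferredList) models with
  | none => simp [hrk, hμ]
  | some μ =>
    obtain ⟨w, hw, hfw⟩ := minR_attained _ _ _ hμ
    have hlt : μ < preferredList.length + 1 := by
      have := rankOf_le preferredList w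
      omega
    have hwB : models.find? (fun m => rankB m == μ) = some w := by
      rw [find?_congr_mem _ (fun m => rankOf preferredList m == μ) _ (fun m _ => by rw [rankB_eq])]
      exact hw
    simp [hrk, hμ, hlt, hwB, hw]
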